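-- pv_equiv track=rewrite | github.com/helper-x-app/Network-Configuration-Generator | app/entrypoint.py | generate_subnets_grouped_by_zones
-- ===== SOURCE A (Python) =====
-- def generate_subnets_grouped_by_zones(all_subnets):
--     data_by_zone = {}
--     for subnet in all_subnets:
--         zone_name = subnet["Zone Name"]
--         if zone_name not in data_by_zone:
--             data_by_zone[zone_name] = []
--         data_by_zone[zone_name].append(subnet)
--
--     return data_by_zone
-- ===== SOURCE B (Python) =====
-- def generate_subnets_grouped_by_zones(all_subnets):
--     # two-phase: collect distinct zone names in first-occurrence order, then
--     # one filter pass per zone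
--     zones = []
--     for subnet in all_subnets:
--         z = subnet["Zone Name"]
--         if z not in zones:
--             zones.append(z)
--     return {z: [s for s in all_subnets if s["Zone Name"] == z] for z in zones}
-- ===== Notes on version B (the rewrite author's own statement) =====
-- stated objective: alternative
-- what changed: Replaces A's single-pass streaming accumulation into a running dict with a two-phase computation: first dedup the zone names in first-occurrence order, then build each group with a filter pass over the input.
import Mathlib
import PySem

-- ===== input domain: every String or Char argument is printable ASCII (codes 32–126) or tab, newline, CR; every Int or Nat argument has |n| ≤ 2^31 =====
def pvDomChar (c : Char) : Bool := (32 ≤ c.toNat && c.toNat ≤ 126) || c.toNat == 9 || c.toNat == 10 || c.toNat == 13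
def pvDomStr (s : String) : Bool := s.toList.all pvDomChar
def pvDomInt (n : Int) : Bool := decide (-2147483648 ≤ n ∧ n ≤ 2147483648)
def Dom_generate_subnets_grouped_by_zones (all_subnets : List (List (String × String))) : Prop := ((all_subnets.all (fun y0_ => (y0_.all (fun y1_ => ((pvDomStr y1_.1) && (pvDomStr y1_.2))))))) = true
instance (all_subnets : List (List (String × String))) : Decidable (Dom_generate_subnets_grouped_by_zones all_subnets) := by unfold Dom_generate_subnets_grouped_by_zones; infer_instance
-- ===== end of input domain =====

-- B replaces A's single-pass dict accumulation by a two-phase computation (dedup the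
-- zone names in first-occurrence order, then one filter pass per zone); alternative, not faster.


-- ===== PORT A =====
-- subnet["Zone Name"]: dict lookup; `none` = KeyError, excluded by Pre_ (total form via getD)
def pvZone (subnet : List (String × String)) : String :=
  ((PySem.Dict.ofList subnet).get? "Zone Name").getD ""

def generate_subnets_grouped_by_zones (all_subnets : List (List (String × String))) : List (String × List (List (String × String))) :=
  (all_subnets.foldl
    (fun data_by_zone subnet =>
      let zone_name := pvZone subnet
      let data_by_zone :=
        if data_by_zone.contains zone_name then data_by_zone
        else data_by_zone.insert zone_name ([] : List (List (String × String)))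
      data_by_zone.modify zone_name [] (fun l => l ++ [subnet]))
    PySem.Dict.empty).items

-- ===== PORT B =====
def generate_subnets_grouped_by_zones_alt (all_subnets : List (List (String × String))) : List (String × List (List (String × String))) :=
  let zones := PySem.Set.ofList (all_subnets.map pvZone)
  zones.map (fun z => (z, all_subnets.filter (fun s => pvZone s == z)))

-- ===== PRECONDITION & SPEC =====
-- Pre_ excludes exactly the subnets missing the "Zone Name" key, on which Python A raises KeyError.
def Pre_generate_subnets_grouped_by_zones (all_subnets : List (List (String × String))) : Prop :=
  (all_subnets.all (fun s => (PySem.Dict.ofList s).contains "Zone Name")) = true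
instance (all_subnets : List (List (String × String))) : Decidable (Pre_generate_subnets_grouped_by_zones all_subnets) := by unfold Pre_generate_subnets_grouped_by_zones; infer_instance
def pvWitness_generate_subnets_grouped_by_zones : (List (List (String × String))) :=
  [[("Zone Name", "dmz"), ("Subnet", "10.0.0.0/24")], [("Zone Name", "lan")]]

def Spec_generate_subnets_grouped_by_zones (all_subnets : List (List (String × String))) (out : List (String × List (List (String × String)))) : Prop := out = generate_subnets_grouped_by_zones_alt all_subnets
instance (all_subnets : List (List (String × String))) (out : List (String × List (List (String × String)))) : Decidable (Spec_generate_subnets_grouped_by_zones all_subnets out) := by unfold Spec_generate_subnets_grouped_by_zones; infer_instance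

-- ===== CLAIM (what is proved, stated in full; the proofs are below) =====
def Claim_equal_generate_subnets_grouped_by_zones : Prop := ∀ (all_subnets : List (List (String × String))), Dom_generate_subnets_grouped_by_zones all_subnets → Pre_generate_subnets_grouped_by_zones all_subnets → Spec_generate_subnets_grouped_by_zones all_subnets (generate_subnets_grouped_by_zones all_subnets)

-- ===== LEMMAS AND PROOFS =====

-- A's loop body (setdefault-then-append) is one `modify` with default []
lemma step_eq_modify (d : PySem.Dict String (List (List (String × String))))
    (subnet : List (String × String)) :
    (let zone_name := pvZone subnet
     let d' := if d.contains zone_name then d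
               else d.insert zone_name ([] : List (List (String × String)))
     d'.modify zone_name [] (fun l => l ++ [subnet]))
    = d.modify (pvZone subnet) [] (fun l => l ++ [subnet]) := by
  by_cases h : d.contains (pvZone subnet)
  · simp [h]
  · simp only [h, Bool.false_eq_true, if_false, PySem.Dict.modify,
      PySem.Dict.getD_insert_self, PySem.Dict.insert_insert_self,
      PySem.Dict.insert_insert_self]
    have hg : d.getD (pvZone subnet) [] = [] :=
      PySem.Dict.getD_of_not_contains d [] (by simpa using h)
    rw [hg]

-- A's fold is the generic modify-append grouping fold over (key, value) pairs
lemma foldA_eq (all_subnets : List (List (String × String))) :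
    generate_subnets_grouped_by_zones all_subnets
    = ((all_subnets.map (fun s => (pvZone s, s))).foldl
        (fun d p => d.modify p.1 [] (fun l => l ++ [p.2])) PySem.Dict.empty).items := by
  unfold generate_subnets_grouped_by_zones
  rw [List.foldl_map]
  apply congrArg PySem.Dict.items
  apply congrArg (fun f => List.foldl f PySem.Dict.empty all_subnets)
  funext d s
  exact step_eq_modify d s

-- ===== VERDICT (by name: the statement is the Claim_ definition above) =====
theorem generate_subnets_grouped_by_zones_spec : Claim_equal_generate_subnets_grouped_by_zones := by
  intro all_subnets _ _
  unfold Spec_generate_subnets_grouped_by_zones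
  rw [foldA_eq]
  set pairs := all_subnets.map (fun s => (pvZone s, s)) with hpairs
  set D := pairs.foldl (fun d p => d.modify p.1 [] (fun l => l ++ [p.2])) PySem.Dict.empty with hD
  have hkeys : D.keys = PySem.Set.ofList (all_subnets.map pvZone) := by
    rw [hD, hpairs, List.foldl_map,
      PySem.Dict.keys_foldl_modify_key all_subnets (fun s => pvZone s) []
        (fun _ s l => l ++ [s]) PySem.Dict.empty]
    simp [PySem.Set.update_nil_left]
  have hnd : D.keys.Nodup := by
    rw [hD, hpairs, List.foldl_map]
    exact PySem.Dict.nodup_keys_foldl_modify_key all_subnets (fun s => pvZone s) []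
      (fun _ s l => l ++ [s]) PySem.Dict.empty (by simp)
  rw [PySem.Dict.items_eq_map_keys D hnd [], hkeys]
  unfold generate_subnets_grouped_by_zones_alt
  apply List.map_congr_left
  intro z _
  have hget := PySem.Dict.getD_foldl_modify_append pairs PySem.Dict.empty z
  rw [← hD] at hget
  rw [hget, hpairs, List.filter_map]
  simp [Function.comp_def]
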